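-- pv_equiv track=rewrite | github.com/colinroybell/aoc-py | src/aoc2025/day11.py | score_b
-- ===== SOURCE A (Python) =====
-- def score_b(node, links, scores):
--     if node in scores:
--         return scores[node]
--
--     total = [[0, 0], [0, 0]]
--     for n in links[node]:
--         s = score_b(n, links, scores)
--         for x in range(2):
--             for y in range(2):
--                 total[x][y] += s[x][y]
--
--     if node == "dac":
--         for x in range(2):
--             total[x][1] += total[x][0]
--             total[x][0] = 0
--
--     if node == "fft":
--         for y in range(2):
--             total[1][y] += total[0][y]
--             total[0][y] = 0
--
--     scores[node] = total
--     return total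
-- ===== SOURCE B (Python) =====
-- def score_b(node, links, scores):
--     # Iterative post-order DFS with an explicit stack (seen/processed marker)
--     # instead of memoized recursion; same memo-dict mutation, same return value.
--     stack = [(node, False)]
--     while stack:
--         n, expanded = stack.pop()
--         if n in scores:
--             continue
--         if not expanded:
--             stack.append((n, True))
--             for c in reversed(links[n]):
--                 stack.append((c, False))
--         else:
--             t00 = t01 = t10 = t11 = 0
--             for c in links[n]:
--                 s = scores[c]
--                 t00 += s[0][0]
--                 t01 += s[0][1]
--                 t10 += s[1][0]
--                 t11 += s[1][1]
--             if n == "dac":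
--                 t00, t01, t10, t11 = 0, t01 + t00, 0, t11 + t10
--             if n == "fft":
--                 t00, t01, t10, t11 = 0, 0, t10 + t00, t11 + t01
--             scores[n] = [[t00, t01], [t10, t11]]
--     return scores[node]
-- ===== Notes on version B (the rewrite author's own statement) =====
-- stated objective: alternative
-- what changed: Replaces A's memoized recursion by an iterative post-order DFS: an explicit stack of (node, expanded) frames, expanding a node once (pushing its children) and resolving it once all children are memoized, writing into the same scores dict; same asymptotic cost, no recursion.
import Mathlib
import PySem

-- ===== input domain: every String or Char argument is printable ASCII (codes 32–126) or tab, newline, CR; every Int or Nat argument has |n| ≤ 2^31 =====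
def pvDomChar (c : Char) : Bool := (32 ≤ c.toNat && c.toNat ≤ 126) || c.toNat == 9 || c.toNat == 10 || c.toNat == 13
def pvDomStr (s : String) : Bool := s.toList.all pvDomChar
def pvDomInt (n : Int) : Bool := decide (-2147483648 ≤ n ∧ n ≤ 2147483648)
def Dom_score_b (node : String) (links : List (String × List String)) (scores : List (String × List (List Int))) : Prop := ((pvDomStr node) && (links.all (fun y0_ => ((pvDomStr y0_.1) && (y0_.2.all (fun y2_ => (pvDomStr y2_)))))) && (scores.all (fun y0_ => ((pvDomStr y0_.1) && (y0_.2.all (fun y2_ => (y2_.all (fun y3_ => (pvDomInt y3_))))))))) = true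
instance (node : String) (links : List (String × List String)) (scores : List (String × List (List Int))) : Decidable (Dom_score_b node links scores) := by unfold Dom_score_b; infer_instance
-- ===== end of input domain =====

-- B replaces A's memoized recursion by an iterative post-order DFS with an explicit
-- stack and a seen/processed marker (objective: alternative decomposition, same cost).
-- Both A and B mutate `scores`; on admitted inputs they perform the same insertions,
-- but the equivalence proved here is about the RETURN value.

-- s[x][y] for literal nonnegative x, y (Python IndexError = none)
def mGet (s : List (List Int)) (x y : Int) : Option Int :=
  match PySem.List.pyGet? s x with
  | none => none
  | some row => PySem.List.pyGet? row y

-- 'for x in range(2): for y in range(2): total[x][y] += s[x][y]' — total is always a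
-- literal 2×2 list here, rebuilt with the four updated cells (exact on such totals)
def matAdd (t s : List (List Int)) : Option (List (List Int)) :=
  match mGet s 0 0, mGet s 0 1, mGet s 1 0, mGet s 1 1,
        mGet t 0 0, mGet t 0 1, mGet t 1 0, mGet t 1 1 with
  | some s00, some s01, some s10, some s11, some t00, some t01, some t10, some t11 =>
      some [[t00 + s00, t01 + s01], [t10 + s10, t11 + s11]]
  | _, _, _, _, _, _, _, _ => none

-- 'total[x][1] += total[x][0]; total[x][0] = 0' for x in range(2)
def dacT (t : List (List Int)) : Option (List (List Int)) :=
  match mGet t 0 0, mGet t 0 1, mGet t 1 0, mGet t 1 1 with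
  | some a, some b, some c, some d => some [[0, b + a], [0, d + c]]
  | _, _, _, _ => none

-- 'total[1][y] += total[0][y]; total[0][y] = 0' for y in range(2)
def fftT (t : List (List Int)) : Option (List (List Int)) :=
  match mGet t 0 0, mGet t 0 1, mGet t 1 0, mGet t 1 1 with
  | some a, some b, some c, some d => some [[0, 0], [c + a, d + b]]
  | _, _, _, _ => none

-- the two 'if node == …' transforms, shared verbatim by both Python versions
def transforms (node : String) (t : List (List Int)) : Option (List (List Int)) :=
  match (if node == "dac" then dacT t else some t) with
  | none => none
  | some t1 => if node == "fft" then fftT t1 else some t1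

-- ===== PORT A =====
-- 'for n in links[node]: s = score_b(...); total += s' — the loop, with `rec` the
-- recursive call at the current fuel level
def foldA (rec : String → PySem.Dict String (List String) → PySem.Dict String (List (List Int)) → Option (PySem.Dict String (List (List Int)) × List (List Int)))
    (links : PySem.Dict String (List String)) :
    List String → PySem.Dict String (List (List Int)) → List (List Int) →
    Option (PySem.Dict String (List (List Int)) × List (List Int))
  | [], sc, tot => some (sc, tot)
  | c :: cs, sc, tot =>
    match rec c links sc with
    | none => none
    | some (sc2, s) =>
      match matAdd tot s with
      | none => none
      | some tot2 => foldA rec links cs sc2 tot2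

-- A's recursion, made total with fuel (Python has none; Pre_ guarantees it suffices);
-- none = KeyError/IndexError or fuel exhausted (Python RecursionError)
def runA : Nat → String → PySem.Dict String (List String) → PySem.Dict String (List (List Int)) → Option (PySem.Dict String (List (List Int)) × List (List Int))
  | 0 => fun _ _ _ => none
  | f + 1 => fun node links sc =>
    match sc.get? node with
    | some m => some (sc, m)
    | none =>
      match links.get? node with
      | none => none
      | some children =>
        match foldA (runA f) links children sc [[0, 0], [0, 0]] with
        | none => none
        | some (sc2, total) =>
          match transforms node total with
          | none => none
          | some t2 => some (sc2.insert node t2, t2)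

def score_b (node : String) (links : List (String × List String)) (scores : List (String × List (List Int))) : List (List Int) :=
  match runA (links.length + 2) node (PySem.Dict.mk links) (PySem.Dict.mk scores) with
  | some (_, m) => m
  | none => []  -- unreachable under Pre_ (fuel links.length+2 suffices there)

-- ===== PORT B =====
-- 'total = [[0,0],[0,0]]; for c in links[n]: s = scores[c]; total += s'
def foldB (sc : PySem.Dict String (List (List Int))) :
    List String → List (List Int) → Option (List (List Int))
  | [], tot => some tot
  | c :: cs, tot =>
    match sc.get? c with
    | none => none
    | some s =>
      match matAdd tot s with
      | none => none
      | some tot2 => foldB sc cs tot2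

-- Source B's while loop; the stack top is the list HEAD (Python appends the reversed
-- children, so its top is the first child — here the children are prepended in order)
def loopB : Nat → List (String × Bool) → PySem.Dict String (List String) → PySem.Dict String (List (List Int)) → Option (PySem.Dict String (List (List Int)))
  | 0 => fun _ _ _ => none
  | g + 1 => fun stack links sc =>
    match stack with
    | [] => some sc
    | (n, expanded) :: rest =>
      match sc.get? n with
      | some _ => loopB g rest links sc
      | none =>
        match links.get? n with
        | none => none
        | some children =>
          if expanded then
            match foldB sc children [[0, 0], [0, 0]] with
            | none => none
            | some total =>
              match transforms n total with
              | none => none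
              | some t2 => loopB g rest links (sc.insert n t2)
          else
            loopB g (children.map (fun c => (c, false)) ++ (n, true) :: rest) links sc

-- fuel for the while loop (Python has none; this bound suffices under Pre_)
def bFuel (links : List (String × List String)) : Nat :=
  ((links.map (fun p => p.2.length)).sum + 2) ^ (links.length + 2) + 1

def score_b_alt (node : String) (links : List (String × List String)) (scores : List (String × List (List Int))) : List (List Int) :=
  match loopB (bFuel links) [(node, false)] (PySem.Dict.mk links) (PySem.Dict.mk scores) with
  | some sc => (sc.get? node).getD []
  | none => []  -- unreachable under Pre_

-- ===== PRECONDITION & SPEC =====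
-- the four cells s[0][0], s[0][1], s[1][0], s[1][1] that A reads all exist
def shapeOk (m : List (List Int)) : Bool :=
  (mGet m 0 0).isSome && (mGet m 0 1).isSome && (mGet m 1 0).isSome && (mGet m 1 1).isSome

-- layered dependency closure: inS k x ⇔ x's value is resolvable within depth k —
-- x is memoized (with a readable 2×2 value) or in links with all children resolvable
def inS (links : PySem.Dict String (List String)) (scores0 : PySem.Dict String (List (List Int))) : Nat → String → Bool
  | 0, x =>
    match scores0.get? x with
    | some m => shapeOk m
    | none => false
  | k + 1, x =>
    inS links scores0 k x ||
      ((scores0.get? x).isNone &&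
        match links.get? x with
        | some cs => cs.all (fun c => inS links scores0 k c)
        | none => false)

-- Pre_ = exactly the inputs on which the Python A returns normally: the queried node
-- is already memoized, or its dependency closure is acyclic, covered by links/scores,
-- and every memoized value it reads is (at least) 2×2; otherwise A raises
-- KeyError/IndexError or recurses forever (RecursionError).
def Pre_score_b (node : String) (links : List (String × List String)) (scores : List (String × List (List Int))) : Prop :=
  (PySem.Dict.mk scores).contains node = true ∨
  inS (PySem.Dict.mk links) (PySem.Dict.mk scores) (links.length + 1) node = true

instance (node : String) (links : List (String × List String)) (scores : List (String × List (List Int))) : Decidable (Pre_score_b node links scores) := by unfold Pre_score_b; infer_instance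

def pvWitness_score_b : String × (List (String × List String)) × (List (String × List (List Int))) :=
  ("a", [("a", ["b", "dac"]), ("b", []), ("dac", ["b"])], [])

def Spec_score_b (node : String) (links : List (String × List String)) (scores : List (String × List (List Int))) (out : List (List Int)) : Prop := out = score_b_alt node links scores
instance (node : String) (links : List (String × List String)) (scores : List (String × List (List Int))) (out : List (List Int)) : Decidable (Spec_score_b node links scores out) := by unfold Spec_score_b; infer_instance

-- ===== CLAIM (what is proved, stated in full; the proofs are below) =====
def Claim_equal_score_b : Prop := ∀ (node : String) (links : List (String × List String)) (scores : List (String × List (List Int))), Dom_score_b node links scores → Pre_score_b node links scores → Spec_score_b node links scores (score_b node links scores)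


-- ===== LEMMAS AND PROOFS =====

-- dict invariant kept through the run: sc preserves every scores0 entry, and any
-- other entry of sc has a readable 2x2 value
def Hd (scores0 sc : PySem.Dict String (List (List Int))) : Prop :=
  (∀ k v, scores0.get? k = some v → sc.get? k = some v) ∧
  (∀ k v, sc.get? k = some v → (∃ w, scores0.get? k = some w) ∨ shapeOk v = true)

def lsum (links : PySem.Dict String (List String)) : Nat :=
  (links.items.map (fun p => p.2.length)).sum

-- everything the strong induction carries for one resolvable node x
def MC (links : PySem.Dict String (List String)) (scores0 : PySem.Dict String (List (List Int)))
    (k : Nat) (x : String) (sc : PySem.Dict String (List (List Int))) : Prop :=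
  ∃ sc' m,
    (∀ f, k + 1 ≤ f → runA f x links sc = some (sc', m)) ∧
    Hd scores0 sc' ∧
    (∀ key v, sc.get? key = some v → sc'.get? key = some v) ∧
    sc'.get? x = some m ∧
    shapeOk m = true ∧
    (∀ key, (sc'.get? key).isSome = true → (sc.get? key).isSome = true ∨ inS links scores0 k key = true) ∧
    ∃ j, j ≤ (lsum links + 2) ^ (k + 1) ∧
      ∀ g st, loopB (g + j) ((x, false) :: st) links sc = loopB g st links sc'

theorem pyGet?_one {α : Type} (x y : α) (r : List α) : PySem.List.pyGet? (x :: y :: r) (1 : Int) = some y := by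
  rw [show ((1 : Int)) = ((1 : Nat) : Int) by norm_num, PySem.List.pyGet?_natCast]; rfl

theorem mGet_00 (a : Int) (r0 : List Int) (rs : List (List Int)) : mGet ((a :: r0) :: rs) 0 0 = some a := by
  unfold mGet; rw [PySem.List.pyGet?_zero_cons]; exact PySem.List.pyGet?_zero_cons _ _

theorem mGet_01 (a b : Int) (r0 : List Int) (rs : List (List Int)) : mGet ((a :: b :: r0) :: rs) 0 1 = some b := by
  unfold mGet; rw [PySem.List.pyGet?_zero_cons]; exact pyGet?_one _ _ _

theorem mGet_10 (c : Int) (r0 : List Int) (r1 : List Int) (rs : List (List Int)) : mGet (r0 :: (c :: r1) :: rs) 1 0 = some c := by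
  unfold mGet; rw [pyGet?_one]; exact PySem.List.pyGet?_zero_cons _ _

theorem mGet_11 (c d : Int) (r0 : List Int) (r1 : List Int) (rs : List (List Int)) : mGet (r0 :: (c :: d :: r1) :: rs) 1 1 = some d := by
  unfold mGet; rw [pyGet?_one]; exact pyGet?_one _ _ _

theorem shapeOk_lit (a b c d : Int) (r : List (List Int)) : shapeOk ([a, b] :: [c, d] :: r) = true := by
  unfold shapeOk
  rw [mGet_00, mGet_01, mGet_10, mGet_11]; rfl

theorem shapeOk_cells (s : List (List Int)) (h : shapeOk s = true) :
    ∃ s00 s01 s10 s11, mGet s 0 0 = some s00 ∧ mGet s 0 1 = some s01 ∧ mGet s 1 0 = some s10 ∧ mGet s 1 1 = some s11 := by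
  unfold shapeOk at h
  simp only [Bool.and_eq_true, Option.isSome_iff_exists] at h
  obtain ⟨⟨⟨⟨x00, h00⟩, x01, h01⟩, x10, h10⟩, x11, h11⟩ := h
  exact ⟨x00, x01, x10, x11, h00, h01, h10, h11⟩

theorem matAdd_eq (t s : List (List Int)) (ht : shapeOk t = true) (hs : shapeOk s = true) :
    ∃ r, matAdd t s = some r ∧ shapeOk r = true := by
  obtain ⟨t00, t01, t10, t11, ht00, ht01, ht10, ht11⟩ := shapeOk_cells t ht
  obtain ⟨s00, s01, s10, s11, hs00, hs01, hs10, hs11⟩ := shapeOk_cells s hs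
  refine ⟨[[t00 + s00, t01 + s01], [t10 + s10, t11 + s11]], ?_, shapeOk_lit _ _ _ _ []⟩
  unfold matAdd
  rw [ht00, ht01, ht10, ht11, hs00, hs01, hs10, hs11]

theorem transforms_eq (x : String) (t : List (List Int)) (ht : shapeOk t = true) :
    ∃ r, transforms x t = some r ∧ shapeOk r = true := by
  obtain ⟨t00, t01, t10, t11, h00, h01, h10, h11⟩ := shapeOk_cells t ht
  unfold transforms
  by_cases hd : x = "dac"
  · subst hd
    have : dacT t = some [[0, t01 + t00], [0, t11 + t10]] := by
      unfold dacT; rw [h00, h01, h10, h11]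
    simp only [this, beq_iff_eq]
    refine ⟨[[0, t01 + t00], [0, t11 + t10]], ?_, shapeOk_lit _ _ _ _ []⟩
    norm_num
    exact fun h => absurd h (by decide)
  · by_cases hf : x = "fft"
    · subst hf
      have : fftT t = some [[0, 0], [t10 + t00, t11 + t01]] := by
        unfold fftT; rw [h00, h01, h10, h11]
      simp only [beq_iff_eq, if_neg (by decide : ¬("fft" = "dac")), this]
      exact ⟨[[0, 0], [t10 + t00, t11 + t01]], rfl, shapeOk_lit _ _ _ _ []⟩
    · simp only [beq_iff_eq, if_neg hd, if_neg hf]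
      exact ⟨t, rfl, ht⟩

theorem inS_succ (links : PySem.Dict String (List String)) (scores0 : PySem.Dict String (List (List Int)))
    (k : Nat) (x : String) (h : inS links scores0 k x = true) : inS links scores0 (k + 1) x = true := by
  simp [inS, h]

theorem inS_mono (links : PySem.Dict String (List String)) (scores0 : PySem.Dict String (List (List Int)))
    {k k' : Nat} (hk : k ≤ k') (x : String) (h : inS links scores0 k x = true) : inS links scores0 k' x = true := by
  induction k' with
  | zero =>
    have : k = 0 := Nat.le_zero.mp hk
    subst this; exact h
  | succ n ih =>
    rcases Nat.le_succ_iff.mp hk with h1 | h1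
    · exact inS_succ links scores0 n x (ih h1)
    · subst h1; exact h

theorem inS_mem0 (links : PySem.Dict String (List String)) (scores0 : PySem.Dict String (List (List Int)))
    (k : Nat) (x : String) (w : List (List Int)) (h : inS links scores0 k x = true)
    (hw : scores0.get? x = some w) : shapeOk w = true := by
  induction k with
  | zero =>
    unfold inS at h; rw [hw] at h; exact h
  | succ n ih =>
    simp only [inS, Bool.or_eq_true, Bool.and_eq_true] at h
    rcases h with h | ⟨h1, _⟩
    · exact ih h
    · rw [hw] at h1; simp at h1

theorem loopB_mono (links : PySem.Dict String (List String)) :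
    ∀ (g : Nat) (st : List (String × Bool)) (sc d : PySem.Dict String (List (List Int))),
      loopB g st links sc = some d → loopB (g + 1) st links sc = some d := by
  intro g
  induction g with
  | zero => intro st sc d h; simp [loopB] at h
  | succ n ih =>
    intro st sc d h
    match st with
    | [] => exact h
    | (nm, e) :: rest =>
      cases hg : sc.get? nm with
      | some v =>
        simp only [loopB, hg] at h ⊢
        exact ih _ _ _ h
      | none =>
        cases hl : links.get? nm with
        | none => simp [loopB, hg, hl] at h
        | some cs =>
          cases e with
          | false =>
            simp only [loopB, hg, hl, Bool.false_eq_true, if_false] at h ⊢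
            exact ih _ _ _ h
          | true =>
            cases hf : foldB sc cs [[0, 0], [0, 0]] with
            | none => simp [loopB, hg, hl, hf] at h
            | some total =>
              cases htr : transforms nm total with
              | none => simp [loopB, hg, hl, hf, htr] at h
              | some t2 =>
                simp only [loopB, hg, hl, if_true, hf, htr] at h ⊢
                exact ih _ _ _ h

theorem loopB_le (links : PySem.Dict String (List String)) {g g' : Nat} (hg : g ≤ g')
    (st : List (String × Bool)) (sc d : PySem.Dict String (List (List Int)))
    (h : loopB g st links sc = some d) : loopB g' st links sc = some d := by
  obtain ⟨k, rfl⟩ := Nat.exists_eq_add_of_le hg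
  clear hg
  induction k with
  | zero => exact h
  | succ n ih => rw [Nat.add_succ]; exact loopB_mono links _ _ _ _ ih

theorem child_len_le (links : PySem.Dict String (List String)) (x : String) (cs : List String)
    (h : links.get? x = some cs) : cs.length ≤ lsum links := by
  have hm : (x, cs) ∈ links.items := PySem.Dict.mem_items_of_get?_eq_some links h
  have : cs.length ∈ links.items.map (fun p => p.2.length) :=
    List.mem_map_of_mem hm
  exact List.single_le_sum (fun _ _ => Nat.zero_le _) _ this

theorem innerL (links : PySem.Dict String (List String)) (scores0 : PySem.Dict String (List (List Int))) (kc : Nat)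
    (HIH : ∀ x sc, inS links scores0 kc x = true → Hd scores0 sc → MC links scores0 kc x sc) :
    ∀ (cs : List String) (sc : PySem.Dict String (List (List Int))) (tot : List (List Int)),
      (∀ c ∈ cs, inS links scores0 kc c = true) → Hd scores0 sc → shapeOk tot = true →
      ∃ sc_m tot',
        (∀ f, kc + 1 ≤ f → foldA (runA f) links cs sc tot = some (sc_m, tot')) ∧
        Hd scores0 sc_m ∧
        (∀ key v, sc.get? key = some v → sc_m.get? key = some v) ∧
        (∀ key, (sc_m.get? key).isSome = true → (sc.get? key).isSome = true ∨ inS links scores0 kc key = true) ∧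
        shapeOk tot' = true ∧
        foldB sc_m cs tot = some tot' ∧
        ∃ j, j ≤ cs.length * (lsum links + 2) ^ (kc + 1) ∧
          ∀ g st, loopB (g + j) (cs.map (fun c => (c, false)) ++ st) links sc = loopB g st links sc_m := by
  intro cs
  induction cs with
  | nil =>
    intro sc tot hcs hd htot
    refine ⟨sc, tot, fun f _ => rfl, hd, fun _ _ h => h, fun _ h => Or.inl h, htot, rfl, 0, Nat.zero_le _, ?_⟩
    intro g st
    simp
  | cons c cs' ih =>
    intro sc tot hcs hd htot
    have hc := hcs c (by simp)
    obtain ⟨sc2, sv, hrun, hd2, hpres2, hget2, hshv, hkeys2, jc, hjc, hmachc⟩ := HIH c sc hc hd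
    obtain ⟨tot2, hma, hshtot2⟩ := matAdd_eq tot sv htot hshv
    obtain ⟨sc_m, tot', hfold, hdm, hpresm, hkeysm, hshtot', hfoldB, j', hj', hmach'⟩ :=
      ih sc2 tot2 (fun d hd' => hcs d (by simp [hd'])) hd2 hshtot2
    refine ⟨sc_m, tot', ?_, hdm, ?_, ?_, hshtot', ?_, jc + j', ?_, ?_⟩
    · intro f hf
      have h1 := hrun f hf
      simp only [foldA, h1, hma]
      exact hfold f hf
    · exact fun key v h => hpresm key v (hpres2 key v h)
    · intro key h
      rcases hkeysm key h with h2 | h2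
      · exact hkeys2 key h2
      · exact Or.inr h2
    · have hcv : sc_m.get? c = some sv := hpresm c sv hget2
      simp only [foldB, hcv, hma]
      exact hfoldB
    · calc jc + j' = j' + jc := Nat.add_comm _ _
        _ ≤ cs'.length * (lsum links + 2) ^ (kc + 1) + (lsum links + 2) ^ (kc + 1) := Nat.add_le_add hj' hjc
        _ = (c :: cs').length * (lsum links + 2) ^ (kc + 1) := by
            rw [List.length_cons, Nat.succ_mul]
    · intro g st
      have e1 : ((c :: cs').map (fun c => (c, false)) ++ st) = (c, false) :: (cs'.map (fun c => (c, false)) ++ st) := by simp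
      rw [e1, show g + (jc + j') = (g + j') + jc by omega]
      have h2 := hmachc (g + j') (cs'.map (fun c => (c, false)) ++ st)
      have h3 := hmach' g st
      exact h2.trans h3

theorem mainL (links : PySem.Dict String (List String)) (scores0 : PySem.Dict String (List (List Int))) :
    ∀ (k : Nat) (x : String) (sc : PySem.Dict String (List (List Int))),
      inS links scores0 k x = true → Hd scores0 sc → MC links scores0 k x sc := by
  intro k
  induction k using Nat.strong_induction_on with
  | _ k IH =>
    intro x sc hx hd
    cases hsx : sc.get? x with
    | some v =>
      refine ⟨sc, v, ?_, hd, fun _ _ h => h, hsx, ?_, fun key h => Or.inl h, 1, Nat.one_le_pow _ _ (by omega), ?_⟩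
      · intro f hf
        obtain ⟨f', rfl⟩ : ∃ f', f = f' + 1 := ⟨f - 1, by omega⟩
        simp [runA, hsx]
      · cases h0 : scores0.get? x with
        | some w =>
          have h2 := hd.1 x w h0
          rw [hsx] at h2
          injection h2 with h3
          subst h3
          exact inS_mem0 links scores0 k x v hx h0
        | none =>
          rcases hd.2 x v hsx with ⟨w, hw⟩ | h2
          · rw [h0] at hw; cases hw
          · exact h2
      · intro g st
        simp only [loopB, hsx]
    | none =>
      have hex : ∃ j, inS links scores0 j x = true := ⟨k, hx⟩
      have hk0 := Nat.find_spec hex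
      have hk0le : Nat.find hex ≤ k := Nat.find_min' hex hx
      have hk0pos : Nat.find hex ≠ 0 := by
        intro h0
        have h1 := Nat.find_spec hex
        rw [h0] at h1
        unfold inS at h1
        cases h0' : scores0.get? x with
        | none => rw [h0'] at h1; exact absurd h1 (by simp)
        | some w =>
          have h2 := hd.1 x w h0'
          rw [hsx] at h2; cases h2
      obtain ⟨kc, hkeq⟩ : ∃ kc, Nat.find hex = kc + 1 := ⟨Nat.find hex - 1, by omega⟩
      have hmin : inS links scores0 kc x = false := by
        have h1 := Nat.find_min hex (show kc < Nat.find hex by omega)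
        simpa using h1
      rw [hkeq] at hk0
      simp only [inS, Bool.or_eq_true, Bool.and_eq_true] at hk0
      rcases hk0 with h | ⟨hnone, hrest⟩
      · rw [hmin] at h; cases h
      · cases hl : links.get? x with
        | none => rw [hl] at hrest; cases hrest
        | some cs =>
          rw [hl] at hrest
          have hcs : ∀ c ∈ cs, inS links scores0 kc c = true := by
            simpa [List.all_eq_true] using hrest
          have hkck : kc < k := by omega
          obtain ⟨sc_m, tot', hfold, hdm, hpresm, hkeysm, hshtot', hfoldB, j', hj', hmach'⟩ :=
            innerL links scores0 kc (fun y sc' hy hd' => IH kc hkck y sc' hy hd') cs sc [[0, 0], [0, 0]] hcs hd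
              (shapeOk_lit 0 0 0 0 [])
          obtain ⟨t2, htr, hsht2⟩ := transforms_eq x tot' hshtot'
          have hxm : sc_m.get? x = none := by
            cases hxm' : sc_m.get? x with
            | none => rfl
            | some w =>
              rcases hkeysm x (by simp [hxm']) with h2 | h2
              · rw [hsx] at h2; simp at h2
              · rw [hmin] at h2; cases h2
          have hxs0 : scores0.get? x = none := by
            cases h0' : scores0.get? x with
            | none => rfl
            | some w => rw [h0'] at hnone; simp at hnone
          refine ⟨sc_m.insert x t2, t2, ?_, ?_, ?_, PySem.Dict.get?_insert_self _ _ _, hsht2, ?_, j' + 2, ?_, ?_⟩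
          · intro f hf
            obtain ⟨f', rfl⟩ : ∃ f', f = f' + 1 := ⟨f - 1, by omega⟩
            have hf' : kc + 1 ≤ f' := by omega
            simp only [runA, hsx, hl, hfold f' hf', htr]
          · constructor
            · intro key v h
              have hkx : key ≠ x := by
                intro e; subst e; rw [h] at hxs0; cases hxs0
              rw [PySem.Dict.get?_insert, if_neg hkx]
              exact hdm.1 key v h
            · intro key v h
              by_cases hkx : key = x
              · subst hkx
                rw [PySem.Dict.get?_insert_self] at h
                injection h with h3
                subst h3
                exact Or.inr hsht2
              · rw [PySem.Dict.get?_insert, if_neg hkx] at h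
                exact hdm.2 key v h
          · intro key v h
            have hkx : key ≠ x := by
              intro e; subst e; rw [h] at hsx; cases hsx
            rw [PySem.Dict.get?_insert, if_neg hkx]
            exact hpresm key v h
          · intro key h
            by_cases hkx : key = x
            · subst hkx; exact Or.inr hx
            · rw [PySem.Dict.get?_insert, if_neg hkx] at h
              rcases hkeysm key h with h2 | h2
              · exact Or.inl h2
              · exact Or.inr (inS_mono links scores0 (by omega) key h2)
          · have h2 : cs.length ≤ lsum links := child_len_le links x cs hl
            have hB1 : 1 ≤ (lsum links + 2) ^ (kc + 1) := Nat.one_le_pow _ _ (by omega)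
            have h3 : (lsum links + 2) ^ (kc + 1) * (lsum links + 2) ≤ (lsum links + 2) ^ (k + 1) := by
              rw [← pow_succ]
              exact Nat.pow_le_pow_right (by omega) (by omega)
            calc j' + 2 ≤ cs.length * (lsum links + 2) ^ (kc + 1) + 2 := by omega
              _ ≤ lsum links * (lsum links + 2) ^ (kc + 1) + 2 * (lsum links + 2) ^ (kc + 1) := by
                  have := Nat.mul_le_mul_right ((lsum links + 2) ^ (kc + 1)) h2
                  omega
              _ = (lsum links + 2) ^ (kc + 1) * (lsum links + 2) := by ring
              _ ≤ (lsum links + 2) ^ (k + 1) := h3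
          · intro g st
            rw [show g + (j' + 2) = (((g + 1) + j') + 1) by omega]
            have s1 : loopB (((g + 1) + j') + 1) ((x, false) :: st) links sc =
                loopB ((g + 1) + j') (cs.map (fun c => (c, false)) ++ (x, true) :: st) links sc := by
              simp only [loopB, hsx, hl, Bool.false_eq_true, if_false]
            rw [s1, hmach' (g + 1) ((x, true) :: st)]
            simp only [loopB, hxm, hl, if_true, hfoldB, htr]


-- ===== VERDICT (by name: the statement is the Claim_ definition above) =====
theorem hd_refl (scores0 : PySem.Dict String (List (List Int))) : Hd scores0 scores0 :=
  ⟨fun _ _ h => h, fun _ v h => Or.inl ⟨v, h⟩⟩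

theorem score_b_spec : Claim_equal_score_b := by
  intro node links scores _hdom hpre
  unfold Spec_score_b score_b score_b_alt
  cases hsx : (PySem.Dict.mk scores).get? node with
  | some v =>
    have hA : runA (links.length + 2) node (PySem.Dict.mk links) (PySem.Dict.mk scores)
        = some (PySem.Dict.mk scores, v) := by
      rw [show links.length + 2 = (links.length + 1) + 1 from rfl]
      simp [runA, hsx]
    have hbf : ∃ p, bFuel links = (p + 1) + 1 := by
      have h1 : 1 ≤ ((links.map (fun p => p.2.length)).sum + 2) ^ (links.length + 2) :=
        Nat.one_le_pow _ _ (by omega)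
      exact ⟨((links.map (fun p => p.2.length)).sum + 2) ^ (links.length + 2) - 1, by unfold bFuel; omega⟩
    obtain ⟨p, hp⟩ := hbf
    have hB : loopB (bFuel links) [(node, false)] (PySem.Dict.mk links) (PySem.Dict.mk scores)
        = some (PySem.Dict.mk scores) := by
      rw [hp]
      simp [loopB, hsx]
    rw [hA, hB]
    simp [hsx]
  | none =>
    have hin : inS (PySem.Dict.mk links) (PySem.Dict.mk scores) (links.length + 1) node = true := by
      rcases hpre with h | h
      · exfalso
        rw [PySem.Dict.contains_eq_isSome_get?, hsx] at h
        simp at h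
      · exact h
    obtain ⟨sc', m, hrun, hd', hpres, hgetx, hsh, hkeys, j, hj, hmach⟩ :=
      mainL (PySem.Dict.mk links) (PySem.Dict.mk scores) (links.length + 1) node
        (PySem.Dict.mk scores) hin (hd_refl _)
    have hA := hrun (links.length + 2) (by omega)
    have h1 : loopB (1 + j) [(node, false)] (PySem.Dict.mk links) (PySem.Dict.mk scores) = some sc' := by
      have h2 := hmach 1 []
      rw [Nat.add_comm 1 j] at h2 ⊢
      rw [h2]
      simp [loopB]
    have hle : 1 + j ≤ bFuel links := by
      have he : lsum (PySem.Dict.mk links) = (links.map (fun p => p.2.length)).sum := rfl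
      rw [he, show links.length + 1 + 1 = links.length + 2 from rfl] at hj
      unfold bFuel
      omega
    have hB := loopB_le (PySem.Dict.mk links) hle _ _ _ h1
    rw [hA, hB]
    simp [hgetx]
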